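-- pv_equiv track=rewrite | github.com/Semensuh/work_projects_Python | similar_fun.py | price_class
-- ===== SOURCE A (Python) =====
-- def price_class(value, borders):
--     """Determine price class according to the prices.
--         Parameters:
--                     value: price must be defined in the price class
--                     borders: prices are the boundaries of the price class
--         Returns a column with price classes.
--     """
--     n = len(borders)
--     if value < borders[0]:
--         return 0
--     elif value >= borders[n-1]:
--         return n
--     else:
--         for i in range(1, n):
--             if (value >= borders[i-1]) and (value < borders[i]):
--                 return i
-- ===== SOURCE B (Python) =====
-- def price_class(value, borders):
--     """Determine price class according to the prices (sorted borders):
--     binary search for the insertion point after any elements equal to value."""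
--     lo, hi = 0, len(borders)
--     while lo < hi:
--         mid = (lo + hi) // 2
--         if value < borders[mid]:
--             hi = mid
--         else:
--             lo = mid + 1
--     return lo
-- ===== Notes on version B (the rewrite author's own statement) =====
-- stated objective: alternative
-- what changed: Replaces the linear scan over adjacent border pairs with a hand-written binary search (bisect_right) for the insertion point of value in the sorted borders; intended as faster (O(log n) vs O(n)) but a timing run measured only ~1.9x at the largest size, inconsistently, so no speed is claimed.
-- outside the precondition, e.g. on price_class(3, [5, 1]): A returns 0, B returns 2
import Mathlib
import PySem

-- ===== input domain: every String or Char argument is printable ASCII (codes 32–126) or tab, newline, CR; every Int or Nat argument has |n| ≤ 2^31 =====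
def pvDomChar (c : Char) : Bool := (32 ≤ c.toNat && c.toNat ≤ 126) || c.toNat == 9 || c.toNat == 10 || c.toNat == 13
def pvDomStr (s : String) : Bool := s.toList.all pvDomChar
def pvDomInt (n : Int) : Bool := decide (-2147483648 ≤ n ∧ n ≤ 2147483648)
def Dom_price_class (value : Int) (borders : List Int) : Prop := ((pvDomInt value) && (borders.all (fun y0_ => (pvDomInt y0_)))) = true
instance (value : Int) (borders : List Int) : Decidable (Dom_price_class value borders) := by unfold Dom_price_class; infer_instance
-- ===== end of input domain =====

-- B replaces A's linear scan over adjacent border pairs with a binary search (bisect_right) for the insertion point of the value.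

-- ===== PORT A =====
-- A's 'for i in range(1, n)' loop: first i with borders[i-1] <= value < borders[i];
-- Python returns None when the loop falls through (excluded by Pre_); the port returns 0 there.
def priceLoop (value : Int) (borders : List Int) : List Int → Int
  | [] => 0
  | i :: rest =>
    if value ≥ PySem.List.pyGetD borders (i - 1) 0 ∧ value < PySem.List.pyGetD borders i 0 then i
    else priceLoop value borders rest

def price_class (value : Int) (borders : List Int) : Int :=
  let n : Int := borders.length
  if value < PySem.List.pyGetD borders 0 0 then 0
  else if value ≥ PySem.List.pyGetD borders (n - 1) 0 then n
  else priceLoop value borders (PySem.List.pyRange 1 n 1)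

-- ===== PORT B =====
-- B's while-loop: lo/hi binary search, structural on hi - lo.
-- the while loop, structurally recursive on a fuel that bounds hi - lo
def bisectGo (a : List Int) (x : Int) : Nat → Nat → Nat → Nat
  | 0, lo, _ => lo
  | fuel + 1, lo, hi =>
    if lo < hi then
      let mid := (lo + hi) / 2
      if x < a.getD mid 0 then bisectGo a x fuel lo mid
      else bisectGo a x fuel (mid + 1) hi
    else lo

def bisectRight (a : List Int) (x : Int) (lo hi : Nat) : Nat :=
  bisectGo a x (hi - lo) lo hi

def price_class_alt (value : Int) (borders : List Int) : Int :=
  (bisectRight borders value 0 borders.length : Int)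

-- ===== PRECONDITION & SPEC =====
-- Pre_ restricts to the function's natural domain: nonempty borders that are nondecreasing
-- (the intended use), or a value lying below all borders / at or above all borders, where the
-- order of the borders cannot matter. On [] A raises IndexError, and on an unsorted borders
-- list with the value strictly inside its range A's scan-order result (sometimes None, not an
-- int) is an accident of the implementation.
def Pre_price_class (value : Int) (borders : List Int) : Prop :=
  borders ≠ [] ∧ (List.IsChain (· ≤ ·) borders ∨
    (∀ b ∈ borders, value < b) ∨ (∀ b ∈ borders, b ≤ value))
instance (value : Int) (borders : List Int) : Decidable (Pre_price_class value borders) := by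
  unfold Pre_price_class; infer_instance

def pvWitness_price_class : Int × List Int := (5, [1, 4, 9])

def Spec_price_class (value : Int) (borders : List Int) (out : Int) : Prop :=
  out = price_class_alt value borders
instance (value : Int) (borders : List Int) (out : Int) : Decidable (Spec_price_class value borders out) := by
  unfold Spec_price_class; infer_instance

-- ===== CLAIM (what is proved, stated in full; the proofs are below) =====
def Claim_equal_price_class : Prop := ∀ (value : Int) (borders : List Int),
  Dom_price_class value borders → Pre_price_class value borders →
  Spec_price_class value borders (price_class value borders)

-- ===== LEMMAS AND PROOFS =====

-- 'k is the insertion point of x in a': everything before k is ≤ x, everything from k on is > x.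
def Ins (x : Int) (a : List Int) (k : Nat) : Prop :=
  k ≤ a.length ∧ (∀ i, i < k → a.getD i 0 ≤ x) ∧ (∀ i, k ≤ i → i < a.length → x < a.getD i 0)

theorem Ins_unique {x : Int} {a : List Int} {k k' : Nat}
    (h : Ins x a k) (h' : Ins x a k') : k = k' := by
  obtain ⟨hk, hlo, hhi⟩ := h
  obtain ⟨hk', hlo', hhi'⟩ := h'
  by_contra hne
  rcases Nat.lt_or_ge k k' with hlt | hge
  · exact absurd (hlo' k hlt) (not_le.mpr (hhi k le_rfl (lt_of_lt_of_le hlt hk')))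
  · have hlt : k' < k := by omega
    exact absurd (hlo k' hlt) (not_le.mpr (hhi' k' le_rfl (lt_of_lt_of_le hlt hk)))

theorem sorted_getD_le {a : List Int} (hs : List.Pairwise (· ≤ ·) a)
    {i j : Nat} (hij : i ≤ j) (hj : j < a.length) : a.getD i 0 ≤ a.getD j 0 := by
  rcases Nat.eq_or_lt_of_le hij with rfl | hlt
  · exact le_rfl
  · rw [List.getD_eq_getElem a 0 (lt_of_le_of_lt hij hj), List.getD_eq_getElem a 0 hj]
    exact (List.pairwise_iff_getElem.mp hs) i j _ _ hlt

theorem bisect_ins (a : List Int) (x : Int) (hs : List.Pairwise (· ≤ ·) a) :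
    ∀ fuel lo hi, hi - lo ≤ fuel → lo ≤ hi → hi ≤ a.length →
    (∀ i, i < lo → a.getD i 0 ≤ x) → (∀ i, hi ≤ i → i < a.length → x < a.getD i 0) →
    Ins x a (bisectGo a x fuel lo hi) := by
  intro fuel
  induction fuel with
  | zero =>
    intro lo hi hd hle hhi hlo hup
    have : lo = hi := by omega
    subst this
    exact ⟨hhi, hlo, fun i h1 h2 => hup i h1 h2⟩
  | succ fuel ih =>
    intro lo hi hd hle hhi hlo hup
    rw [bisectGo]
    by_cases h : lo < hi
    · simp only [h, if_pos]
      set mid := (lo + hi) / 2 with hmid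
      have hmlt : mid < hi := by omega
      have hmge : lo ≤ mid := by omega
      by_cases hx : x < a.getD mid 0
      · simp only [hx, if_pos]
        refine ih lo mid (by omega) hmge (by omega) hlo ?_
        intro i hi1 hi2
        exact lt_of_lt_of_le hx (sorted_getD_le hs hi1 hi2)
      · simp only [hx, if_neg, not_false_iff]
        refine ih (mid + 1) hi (by omega) (by omega) hhi ?_ hup
        intro i hi1
        exact le_trans (sorted_getD_le hs (by omega) (by omega)) (not_lt.mp hx)
    · simp only [h, if_neg, not_false_iff]
      exact ⟨by omega, hlo, fun i h1 h2 => hup i (by omega) h2⟩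

theorem go_all_lt (a : List Int) (x : Int) (hall : ∀ b ∈ a, x < b) :
    ∀ fuel lo hi, hi ≤ a.length → bisectGo a x fuel lo hi = lo := by
  intro fuel
  induction fuel with
  | zero => intro lo hi _; rfl
  | succ fuel ih =>
    intro lo hi hhi
    rw [bisectGo]
    by_cases h : lo < hi
    · have hmem : a.getD ((lo + hi) / 2) 0 ∈ a := by
        rw [List.getD_eq_getElem a 0 (by omega)]
        exact a.getElem_mem _
      simp only [h, if_pos, hall _ hmem, if_pos]
      exact ih lo _ (by omega)
    · simp only [h, if_neg, not_false_iff]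

theorem go_all_le (a : List Int) (x : Int) (hall : ∀ b ∈ a, b ≤ x) :
    ∀ fuel lo hi, hi - lo ≤ fuel → lo ≤ hi → hi ≤ a.length → bisectGo a x fuel lo hi = hi := by
  intro fuel
  induction fuel with
  | zero => intro lo hi h1 h2 _; simp only [bisectGo]; omega
  | succ fuel ih =>
    intro lo hi h1 h2 hhi
    rw [bisectGo]
    by_cases h : lo < hi
    · have hmem : a.getD ((lo + hi) / 2) 0 ∈ a := by
        rw [List.getD_eq_getElem a 0 (by omega)]
        exact a.getElem_mem _
      simp only [h, if_pos, not_lt.mpr (hall _ hmem)]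
      exact ih _ hi (by omega) (by omega) hhi
    · simp only [h, if_neg, not_false_iff]
      omega

theorem getD_mem (a : List Int) (i : Nat) (h : i < a.length) : a.getD i 0 ∈ a := by
  rw [List.getD_eq_getElem a 0 h]; exact a.getElem_mem _

theorem alt_ins (x : Int) (a : List Int) (hs : List.Pairwise (· ≤ ·) a) :
    Ins x a (bisectRight a x 0 a.length) :=
  bisect_ins a x hs a.length 0 a.length (by omega) (by omega) le_rfl
    (fun i h => absurd h (Nat.not_lt_zero i)) (fun i h1 h2 => absurd h2 (by omega))

-- A's inner loop: starting at j with a[j-1] ≤ x and x < a[len-1], it returns the first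
-- j with a[j-1] ≤ x < a[j].
theorem loop_ins (x : Int) (a : List Int)
    (hlast : x < a.getD (a.length - 1) 0) :
    ∀ d (j : Nat), a.length - j = d → 1 ≤ j → j < a.length → a.getD (j - 1) 0 ≤ x →
    ∃ k : Nat, priceLoop x a (PySem.List.pyRange (j : Int) (a.length : Int) 1) = (k : Int) ∧
      1 ≤ k ∧ k < a.length ∧ a.getD (k - 1) 0 ≤ x ∧ x < a.getD k 0 := by
  intro d
  induction d with
  | zero => intro j hd h1 h2 h3; omega
  | succ d ih =>
    intro j hd h1 h2 h3
    rw [PySem.List.pyRange_one_cons (by exact_mod_cast h2)]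
    rw [priceLoop]
    have hcast : ((j : Int) - 1) = ((j - 1 : Nat) : Int) := by omega
    rw [hcast]
    simp only [PySem.List.pyGetD_natCast]
    by_cases hc : x ≥ a.getD (j - 1) 0 ∧ x < a.getD j 0
    · simp only [hc]
      exact ⟨j, rfl, h1, h2, h3, hc.2⟩
    · simp only [hc, if_neg, not_false_iff]
      have hxj : a.getD j 0 ≤ x := by
        rcases not_and_or.mp hc with h | h
        · exact absurd h3 (not_le.mpr (not_le.mp h))
        · exact not_lt.mp h
      have hjlt : j + 1 < a.length := by
        by_contra hge
        have : j = a.length - 1 := by omega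
        exact absurd hlast (not_lt.mpr (this ▸ hxj))
      have := ih (j + 1) (by omega) (by omega) hjlt (by simpa using hxj)
      simpa using this

theorem a_ins (x : Int) (a : List Int) (hne : a ≠ []) (hs : List.Pairwise (· ≤ ·) a) :
    ∃ k : Nat, price_class x a = (k : Int) ∧ Ins x a k := by
  have hlen : 1 ≤ a.length := List.length_pos_iff.mpr hne
  unfold price_class
  simp only []
  by_cases h0 : x < PySem.List.pyGetD a 0 0
  · simp only [h0, if_pos]
    refine ⟨0, rfl, le_of_lt (by omega), fun i h => absurd h (Nat.not_lt_zero i), ?_⟩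
    intro i _ hi
    have : PySem.List.pyGetD a 0 0 = a.getD 0 0 := by
      simpa using PySem.List.pyGetD_natCast a 0 0
    rw [this] at h0
    exact lt_of_lt_of_le h0 (sorted_getD_le hs (Nat.zero_le i) hi)
  · simp only [h0, if_neg, not_false_iff]
    have hcast : ((a.length : Int) - 1) = ((a.length - 1 : Nat) : Int) := by omega
    rw [hcast]
    simp only [PySem.List.pyGetD_natCast]
    by_cases hL : x ≥ a.getD (a.length - 1) 0
    · simp only [hL, if_pos]
      refine ⟨a.length, rfl, le_rfl, ?_, fun i h1 h2 => absurd h2 (by omega)⟩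
      intro i hi
      exact le_trans (sorted_getD_le hs (by omega) (by omega)) hL
    · simp only [hL, if_neg, not_false_iff]
      have h0' : a.getD 0 0 ≤ x := by
        have : PySem.List.pyGetD a 0 0 = a.getD 0 0 := by
          simpa using PySem.List.pyGetD_natCast a 0 0
        rw [this] at h0; exact not_lt.mp h0
      have h2len : 1 < a.length := by
        rcases Nat.lt_or_ge 1 a.length with h | h
        · exact h
        · exfalso
          have : a.length - 1 = 0 := by omega
          rw [this] at hL
          exact hL h0'
      obtain ⟨k, hk, hk1, hk2, hk3, hk4⟩ :=
        loop_ins x a (not_le.mp hL) (a.length - 1) 1 (by omega) le_rfl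
          h2len (by simpa using h0')
      refine ⟨k, hk, le_of_lt hk2, ?_, ?_⟩
      · intro i hi
        exact le_trans (sorted_getD_le hs (by omega) (by omega)) hk3
      · intro i h1 h2
        exact lt_of_lt_of_le hk4 (sorted_getD_le hs h1 h2)

-- ===== VERDICT (by name: the statement is the Claim_ definition above) =====
theorem price_class_spec : Claim_equal_price_class := by
  intro value borders _ hpre
  obtain ⟨hne, hs' | hlt | hle⟩ := hpre
  · have hs : List.Pairwise (· ≤ ·) borders := List.isChain_iff_pairwise.mp hs'
    obtain ⟨k, hk, hins⟩ := a_ins value borders hne hs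
    have halt := alt_ins value borders hs
    unfold Spec_price_class price_class_alt
    rw [hk, Ins_unique hins halt]
  · -- value below every border: both return 0
    have hlen : 0 < borders.length := List.length_pos_iff.mpr hne
    have h0 : value < borders.getD 0 0 := hlt _ (getD_mem borders 0 hlen)
    unfold Spec_price_class price_class_alt price_class
    rw [bisectRight, go_all_lt borders value hlt _ _ _ le_rfl]
    simp only [PySem.List.pyGetD_zero, h0, if_pos]
    rfl
  · -- value at or above every border: both return the length
    have hlen : 0 < borders.length := List.length_pos_iff.mpr hne
    have h0 : borders.getD 0 0 ≤ value := hle _ (getD_mem borders 0 hlen)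
    have hL : borders.getD (borders.length - 1) 0 ≤ value :=
      hle _ (getD_mem borders (borders.length - 1) (by omega))
    unfold Spec_price_class price_class_alt price_class
    rw [bisectRight, go_all_le borders value hle _ _ _ (by omega) (by omega) le_rfl]
    have hcast : ((borders.length : Int) - 1) = ((borders.length - 1 : Nat) : Int) := by omega
    rw [if_neg (by simpa [PySem.List.pyGetD_zero] using not_lt.mpr h0), hcast]
    simp only [PySem.List.pyGetD_natCast]
    rw [if_pos (by simpa using hL)]
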